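-- pv_equiv track=rewrite | github.com/loganyu/leetcode | problems/2528_maximize_the_minimum_powered_city.py | maxPower
-- ===== SOURCE A (Python) =====
-- from typing import List
--
-- def maxPower(stations: List[int], r: int, k: int) -> int:
--     n = len(stations)
--     cnt = [0] * (n + 1)
--
--     for i in range(n):
--         left = max(0, i - r)
--         right = min(n, i + r + 1)
--         cnt[left] += stations[i]
--         cnt[right] -= stations[i]
--
--     def check(val: int) -> bool:
--         diff = cnt.copy()
--         total = 0
--         remaining = k
--
--         for i in range(n):
--             total += diff[i]
--             if total < val:
--                 add = val - total
--                 if remaining < add: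
--                     return False
--                 remaining -= add
--                 end = min(n, i + 2 * r + 1)
--                 diff[end] -= add
--                 total += add
--         return True
--
--     lo, hi = min(stations), sum(stations) + k
--     res = 0
--     while lo <= hi:
--         mid = (lo + hi) // 2
--         if check(mid):
--             res = mid
--             lo = mid + 1
--         else:
--             hi = mid - 1
--     return res
-- ===== SOURCE B (Python) =====
-- from typing import List
--
-- def maxPower(stations: List[int], r: int, k: int) -> int:
--     n = len(stations)
--     # base power of each city from prefix sums of stations
--     pref = [0] * (n + 1)
--     for i in range(n):
--         pref[i + 1] = pref[i] + stations[i]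
--     power = [pref[min(n, i + r + 1)] - pref[max(0, i - r)] for i in range(n)]
--
--     span = 2 * r + 1
--
--     def feasible(val: int) -> bool:
--         # pending additions as a FIFO of (city, amount) events, popped as they
--         # fall out of range; live = sum of amounts still covering the cursor
--         pending = []
--         live = 0
--         budget = k
--         for i in range(n):
--             while pending and pending[0][0] + span <= i:
--                 live -= pending.pop(0)[1]
--             deficit = val - power[i] - live
--             if deficit > 0:
--                 budget -= deficit
--                 if budget < 0:
--                     return False
--                 pending.append((i, deficit))
--                 live += deficit
--         return True
--
--     def search(lo: int, hi: int):
--         # largest feasible value in [lo, hi], or None if none is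
--         if lo > hi:
--             return None
--         mid = (lo + hi) // 2
--         if feasible(mid):
--             right = search(mid + 1, hi)
--             return mid if right is None else right
--         return search(lo, mid - 1)
--
--     best = search(min(stations), sum(stations) + k)
--     return 0 if best is None else best
-- ===== Notes on version B (the rewrite author's own statement) =====
-- stated objective: alternative
-- what changed: A mutates a copy of one fused difference array inside an iterative while-loop binary search; B precomputes an explicit per-city power array from prefix sums, checks feasibility with a FIFO event queue of (city, amount) placements popped as they leave range (no arrays mutated), and finds the answer by a recursive Option-returning search on the interval instead of a res-accumulator loop.
-- outside the precondition, e.g. on maxPower([], 1, 2): A raises ValueError, B raises ValueError; on maxPower([3, 3], -1, 10): A returns 7, B returns 0; on maxPower([5], -2, 0): A raises IndexError, B raises IndexError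
import Mathlib
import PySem

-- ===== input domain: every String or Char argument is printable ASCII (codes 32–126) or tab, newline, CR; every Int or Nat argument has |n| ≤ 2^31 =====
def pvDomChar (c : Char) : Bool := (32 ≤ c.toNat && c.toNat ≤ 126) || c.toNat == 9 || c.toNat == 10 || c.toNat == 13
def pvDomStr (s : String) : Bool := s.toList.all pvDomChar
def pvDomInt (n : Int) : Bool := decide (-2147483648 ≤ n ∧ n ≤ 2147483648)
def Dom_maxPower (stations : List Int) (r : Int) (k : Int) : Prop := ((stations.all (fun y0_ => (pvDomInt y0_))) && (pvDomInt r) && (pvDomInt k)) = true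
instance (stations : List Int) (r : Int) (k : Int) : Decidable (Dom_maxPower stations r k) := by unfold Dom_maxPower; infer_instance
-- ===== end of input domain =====

-- B replaces A's fused mutable difference array and iterative res-accumulator binary search
-- by an explicit prefix-sum power array, a FIFO event queue of placements in the check, and
-- a recursive Option-returning interval search (objective: alternative decomposition).

-- ===== PORT A =====
-- A: cnt[left..right) difference array of station coverage (indices are nonnegative and in
-- range for the inputs admitted by Pre_ (r ≥ 0), so .toNat is exact there).
def pvStepA (stations : List Int) (r : Int) (cnt : List Int) (i : Nat) : List Int :=
  let s := stations.getD i 0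
  let left := (max 0 ((i : Int) - r)).toNat
  let right := (min (stations.length : Int) ((i : Int) + r + 1)).toNat
  let c1 := cnt.set left (cnt.getD left 0 + s)
  c1.set right (c1.getD right 0 - s)

def pvBuildCnt (stations : List Int) (r : Int) : List Int :=
  (List.range stations.length).foldl (pvStepA stations r) (List.replicate (stations.length + 1) 0)

-- A's check(val): scan i, total = running prefix of diff (cnt mutated by placements).
def pvCheckA (n : Nat) (r val : Int) (i : Nat) (diff : List Int) (total remaining : Int) : Bool :=
  if i < n then
    let total := total + diff.getD i 0
    if total < val then
      let add := val - total
      if remaining < add then false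
      else
        let e := (min (n : Int) ((i : Int) + 2 * r + 1)).toNat
        pvCheckA n r val (i + 1) (diff.set e (diff.getD e 0 - add)) (total + add) (remaining - add)
    else pvCheckA n r val (i + 1) diff total remaining
  else true
termination_by n - i

def pvSearchA (cnt : List Int) (n : Nat) (r k : Int) (lo hi res : Int) : Int :=
  if lo ≤ hi then
    let mid := PySem.Int.floordiv (lo + hi) 2
    if pvCheckA n r mid 0 cnt 0 k then pvSearchA cnt n r k (mid + 1) hi mid
    else pvSearchA cnt n r k lo (mid - 1) res
  else res
termination_by (hi + 1 - lo).toNat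
decreasing_by
  all_goals
    have h := PySem.Int.floordiv_two_mid_bounds (show lo ≤ hi by assumption)
    omega

-- min(stations) raises on []; Pre_ excludes the empty list, so getD's default is never used.
def maxPower (stations : List Int) (r : Int) (k : Int) : Int :=
  let n := stations.length
  let cnt := pvBuildCnt stations r
  let lo := (PySem.List.min? stations (fun x => x)).getD 0
  let hi := stations.sum + k
  pvSearchA cnt n r k lo hi 0

-- ===== PORT B =====
-- B: pref = prefix sums of stations; power[i] = base power of city i.
def pvPref (stations : List Int) : List Int :=
  (List.range stations.length).foldl
    (fun pref i => pref.set (i + 1) (pref.getD i 0 + stations.getD i 0))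
    (List.replicate (stations.length + 1) 0)

def pvPowerB (stations : List Int) (r : Int) : List Int :=
  let n := stations.length
  let pref := pvPref stations
  (List.range n).map (fun (i : Nat) =>
    pref.getD ((min (n : Int) ((i : Int) + r + 1)).toNat) 0 -
    pref.getD ((max 0 ((i : Int) - r)).toNat) 0)

-- B's inner while loop: pop expired events from the front of the FIFO queue.
def pvDrain (span : Int) (i : Nat) : List (Nat × Int) → Int → (List (Nat × Int)) × Int
  | [], live => ([], live)
  | (j, a) :: rest, live =>
    if (j : Int) + span ≤ (i : Int) then pvDrain span i rest (live - a)
    else ((j, a) :: rest, live)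

-- B's feasible(val): event queue of (city, amount) placements, live = sum still in range.
def pvCheckB (power : List Int) (n : Nat) (span val : Int) (i : Nat) (pending : List (Nat × Int)) (live budget : Int) : Bool :=
  if i < n then
    let d := pvDrain span i pending live
    let deficit := val - power.getD i 0 - d.2
    if 0 < deficit then
      if budget - deficit < 0 then false
      else pvCheckB power n span val (i + 1) (d.1 ++ [(i, deficit)]) (d.2 + deficit) (budget - deficit)
    else pvCheckB power n span val (i + 1) d.1 d.2 budget
  else true
termination_by n - i

-- B's search(lo, hi): largest feasible value in [lo, hi], or none.
def pvSearchB (power : List Int) (n : Nat) (span k : Int) (lo hi : Int) : Option Int :=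
  if lo > hi then none
  else
    let mid := PySem.Int.floordiv (lo + hi) 2
    if pvCheckB power n span mid 0 [] 0 k then
      match pvSearchB power n span k (mid + 1) hi with
      | none => some mid
      | some v => some v
    else pvSearchB power n span k lo (mid - 1)
termination_by (hi + 1 - lo).toNat
decreasing_by
  all_goals
    have h := PySem.Int.floordiv_two_mid_bounds (show lo ≤ hi by omega)
    omega

def maxPower_alt (stations : List Int) (r : Int) (k : Int) : Int :=
  let n := stations.length
  let power := pvPowerB stations r
  (pvSearchB power n (2 * r + 1) k ((PySem.List.min? stations (fun x => x)).getD 0) (stations.sum + k)).getD 0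

-- ===== PRECONDITION & SPEC =====
-- Pre_ keeps the function's natural domain: a nonempty city list (Python's min([]) raises
-- ValueError on []) and a nonnegative radius (for r ≤ -2 A raises IndexError; r = -1 is a
-- negative radius outside the problem's domain, where A only returns via accidental
-- negative-index wraparound — excluded as outside the natural domain).
def Pre_maxPower (stations : List Int) (r : Int) (k : Int) : Prop :=
  stations ≠ [] ∧ 0 ≤ r
instance (stations : List Int) (r : Int) (k : Int) : Decidable (Pre_maxPower stations r k) := by
  unfold Pre_maxPower; infer_instance

def pvWitness_maxPower : List Int × Int × Int := ([1, 2, 4, 5, 0], 1, 2)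

def Spec_maxPower (stations : List Int) (r : Int) (k : Int) (out : Int) : Prop := out = maxPower_alt stations r k
instance (stations : List Int) (r : Int) (k : Int) (out : Int) : Decidable (Spec_maxPower stations r k out) := by unfold Spec_maxPower; infer_instance

-- ===== CLAIM (what is proved, stated in full; the proofs are below) =====
def Claim_equal_maxPower : Prop := ∀ (stations : List Int) (r : Int) (k : Int), Dom_maxPower stations r k → Pre_maxPower stations r k → Spec_maxPower stations r k (maxPower stations r k)

-- ===== LEMMAS AND PROOFS =====

-- helper lemmas about list update / prefix sums

theorem pv_getD_set_ne (l : List Int) (p j : Nat) (a : Int) (hne : p ≠ j) :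
    (l.set p a).getD j 0 = l.getD j 0 := by
  simp [List.getD_eq_getElem?_getD, List.getElem?_set_ne hne]

theorem pv_getD_set_self (l : List Int) (p : Nat) (a : Int) (h : p < l.length) :
    (l.set p a).getD p 0 = a := by
  simp [List.getD_eq_getElem?_getD, List.getElem?_set_self h]

theorem pv_sum_take_succ (l : List Int) (j : Nat) (h : j < l.length) :
    (l.take (j+1)).sum = (l.take j).sum + l.getD j 0 := by
  have h1 := List.sum_take_add_sum_drop l (j+1)
  have h2 := List.sum_take_add_sum_drop l j
  rw [List.drop_eq_getElem_cons h] at h2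
  simp only [List.sum_cons] at h2
  rw [List.getD_eq_getElem l 0 h]
  omega

theorem pv_sum_take_set (c : List Int) (p i : Nat) (v x : Int) (hp : p < c.length)
    (hx : x = c.getD p 0 + v) :
    ((c.set p x).take (i+1)).sum = (c.take (i+1)).sum + if p ≤ i then v else 0 := by
  by_cases hpi : p ≤ i
  · rw [List.take_set, if_pos hpi]
    have hplen : p < (c.take (i+1)).length := by
      simp [List.length_take]; omega
    rw [List.sum_set]
    have h1 : (c.take (i+1)).sum = ((c.take (i+1)).take p).sum + (c.take (i+1)).getD p 0
        + ((c.take (i+1)).drop (p+1)).sum := by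
      have := List.sum_take_add_sum_drop (c.take (i+1)) (p+1)
      have h2 := pv_sum_take_succ (c.take (i+1)) p hplen
      omega
    have hgd : (c.take (i+1)).getD p 0 = c.getD p 0 := by
      simp [List.getD_eq_getElem?_getD, List.getElem?_take_of_lt (Nat.lt_succ_iff.mpr hpi)]
    rw [if_pos hplen]
    omega
  · rw [List.take_set, if_neg hpi, List.set_eq_of_length_le]
    · omega
    · simp [List.length_take]; omega

-- per-station contribution of A's difference-array build to the prefix sum up to index i
def pvG (st : List Int) (r : Int) (i : Nat) (m : Nat) : Int :=
  (if (max 0 ((m:Int) - r)).toNat ≤ i then st.getD m 0 else 0)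
  - (if (min (st.length:Int) ((m:Int) + r + 1)).toNat ≤ i then st.getD m 0 else 0)

theorem pv_stepA_length (st : List Int) (r : Int) (c : List Int) (m : Nat) :
    (pvStepA st r c m).length = c.length := by
  simp [pvStepA]

theorem pv_step_take_sum (st : List Int) (r : Int) (hr : 0 ≤ r) (c : List Int) (m i : Nat)
    (hm : m < st.length) (hc : c.length = st.length + 1) :
    ((pvStepA st r c m).take (i+1)).sum = (c.take (i+1)).sum + pvG st r i m := by
  unfold pvStepA
  have hl : (max 0 ((m:Int) - r)).toNat < c.length := by omega
  have hrr : (min (st.length:Int) ((m:Int) + r + 1)).toNat < c.length := by omega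
  rw [pv_sum_take_set _ _ i (-(st.getD m 0)) _ (by simpa using hrr) (by ring)]
  rw [pv_sum_take_set _ _ i (st.getD m 0) _ hl rfl]
  unfold pvG
  split_ifs <;> ring

theorem pv_fold_take_sum (st : List Int) (r : Int) (hr : 0 ≤ r) (i : Nat) :
    ∀ (ms : List Nat) (c : List Int), c.length = st.length + 1 → (∀ m ∈ ms, m < st.length) →
    (((ms.foldl (pvStepA st r) c)).take (i+1)).sum = (c.take (i+1)).sum + (ms.map (pvG st r i)).sum
  | [], c, _, _ => by simp
  | m :: ms, c, hc, hms => by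
    simp only [List.foldl_cons, List.map_cons, List.sum_cons]
    rw [pv_fold_take_sum st r hr i ms _ (by rw [pv_stepA_length]; exact hc)
        (fun x hx => hms x (List.mem_cons_of_mem _ hx))]
    rw [pv_step_take_sum st r hr c m i (hms m List.mem_cons_self) hc]
    ring

theorem pv_fold_length (st : List Int) (r : Int) :
    ∀ (ms : List Nat) (c : List Int), (ms.foldl (pvStepA st r) c).length = c.length
  | [], _ => rfl
  | m :: ms, c => by
    simp only [List.foldl_cons]
    rw [pv_fold_length st r ms, pv_stepA_length]

theorem pv_buildCnt_length (st : List Int) (r : Int) :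
    (pvBuildCnt st r).length = st.length + 1 := by
  unfold pvBuildCnt
  rw [pv_fold_length]
  simp

theorem pv_cnt_take_sum (st : List Int) (r : Int) (hr : 0 ≤ r) (i : Nat) :
    ((pvBuildCnt st r).take (i+1)).sum = ((List.range st.length).map (pvG st r i)).sum := by
  unfold pvBuildCnt
  rw [pv_fold_take_sum st r hr i (List.range st.length) _ (by simp)
      (fun m hm => List.mem_range.mp hm)]
  simp [List.take_replicate]

theorem pv_pref_invariant (st : List Int) : ∀ (mm : Nat), mm ≤ st.length →
    ((List.range mm).foldl (fun pref i => pref.set (i + 1) (pref.getD i 0 + st.getD i 0))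
      (List.replicate (st.length + 1) 0)).length = st.length + 1 ∧
    ∀ j : Nat, ((List.range mm).foldl (fun pref i => pref.set (i + 1) (pref.getD i 0 + st.getD i 0))
      (List.replicate (st.length + 1) 0)).getD j 0 = if j ≤ mm then (st.take j).sum else 0
  | 0, _ => by
    constructor
    · simp
    · intro j
      simp only [List.range_zero, List.foldl_nil]
      rw [show (List.replicate (st.length + 1) (0:Int)).getD j 0 = 0 from by
        simp [List.getD_eq_getElem?_getD, List.getElem?_replicate]; split <;> rfl]
      by_cases h : j ≤ 0
      · rw [if_pos h, show j = 0 from by omega]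
        simp
      · rw [if_neg h]
  | mm + 1, hmm => by
    obtain ⟨hlen, hget⟩ := pv_pref_invariant st mm (by omega)
    rw [List.range_succ, List.foldl_append, List.foldl_cons, List.foldl_nil]
    have hv : ((List.range mm).foldl (fun pref i => pref.set (i + 1) (pref.getD i 0 + st.getD i 0))
        (List.replicate (st.length + 1) 0)).getD mm 0 + st.getD mm 0 = (st.take (mm+1)).sum := by
      rw [hget mm, if_pos (le_refl mm), pv_sum_take_succ st mm (by omega)]
    constructor
    · rw [List.length_set, hlen]
    · intro j
      by_cases hj : j = mm + 1
      · subst hj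
        rw [pv_getD_set_self _ _ _ (by omega), hv, if_pos (le_refl _)]
      · rw [pv_getD_set_ne _ _ _ _ (fun h => hj h.symm), hget j]
        by_cases h2 : j ≤ mm
        · rw [if_pos h2, if_pos (by omega)]
        · rw [if_neg h2, if_neg (by omega)]

theorem pv_pref_getD (st : List Int) (j : Nat) (hj : j ≤ st.length) :
    (pvPref st).getD j 0 = (st.take j).sum := by
  unfold pvPref
  rw [(pv_pref_invariant st st.length (le_refl _)).2 j, if_pos hj]

theorem pv_sum_ind (st : List Int) : ∀ (N a b : Nat), a ≤ b → b ≤ N → b ≤ st.length →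
    ((List.range N).map (fun m => if a ≤ m ∧ m < b then st.getD m 0 else 0)).sum
      = (st.take b).sum - (st.take a).sum
  | 0, a, b, hab, hbN, _ => by
    have ha : a = 0 := by omega
    have hb : b = 0 := by omega
    simp [ha, hb]
  | N + 1, a, b, hab, hbN, hbl => by
    rw [List.range_succ, List.map_append, List.sum_append]
    by_cases hb : b ≤ N
    · rw [pv_sum_ind st N a b hab hb hbl]
      simp only [List.map_cons, List.map_nil, List.sum_cons, List.sum_nil]
      have : ¬ (a ≤ N ∧ N < b) := by omega
      rw [if_neg this]
      ring
    · have hbe : b = N + 1 := by omega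
      subst hbe
      by_cases ha : a ≤ N
      · have hcongr : (List.range N).map (fun m => if a ≤ m ∧ m < N + 1 then st.getD m 0 else 0)
            = (List.range N).map (fun m => if a ≤ m ∧ m < N then st.getD m 0 else 0) := by
          apply List.map_congr_left
          intro m hm
          have hmN : m < N := List.mem_range.mp hm
          by_cases h : a ≤ m
          · rw [if_pos ⟨h, by omega⟩, if_pos ⟨h, hmN⟩]
          · rw [if_neg (by omega), if_neg (by omega)]
        rw [hcongr, pv_sum_ind st N a N ha (le_refl _) (by omega)]
        simp only [List.map_cons, List.map_nil, List.sum_cons, List.sum_nil]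
        rw [if_pos ⟨ha, by omega⟩, pv_sum_take_succ st N (by omega)]
        ring
      · have hae : a = N + 1 := by omega
        subst hae
        simp only [List.map_cons, List.map_nil, List.sum_cons, List.sum_nil]
        rw [if_neg (by omega)]
        have : ∀ x ∈ (List.range N).map (fun m => if N + 1 ≤ m ∧ m < N + 1 then st.getD m 0 else 0), x = 0 := by
          intro x hx
          obtain ⟨m, _, hmx⟩ := List.mem_map.mp hx
          rw [if_neg (by omega)] at hmx
          omega
        rw [List.sum_eq_zero this]
        ring

theorem pv_power_getD (st : List Int) (r : Int) (hr : 0 ≤ r) (i : Nat) (hi : i < st.length) :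
    (pvPowerB st r).getD i 0 = ((pvBuildCnt st r).take (i+1)).sum := by
  have hlhs : (pvPowerB st r).getD i 0
      = (st.take ((min (st.length:Int) ((i:Int) + r + 1)).toNat)).sum
        - (st.take ((max 0 ((i:Int) - r)).toNat)).sum := by
    unfold pvPowerB
    rw [List.getD_eq_getElem _ 0 (by simpa using hi)]
    simp only [List.getElem_map, List.getElem_range]
    rw [pv_pref_getD st _ (by omega), pv_pref_getD st _ (by omega)]
  rw [hlhs, pv_cnt_take_sum st r hr i]
  have hcongr : (List.range st.length).map (pvG st r i)
      = (List.range st.length).map (fun m =>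
          if (max 0 ((i:Int) - r)).toNat ≤ m ∧ m < (min (st.length:Int) ((i:Int) + r + 1)).toNat
          then st.getD m 0 else 0) := by
    apply List.map_congr_left
    intro m hm
    have hmn : m < st.length := List.mem_range.mp hm
    unfold pvG
    split_ifs <;> (try (exfalso; omega)) <;> ring
  rw [hcongr, pv_sum_ind st st.length _ _ (by omega) (by omega) (by omega)]

-- proof-side helper: A's check re-expressed over (power, expire array, running added sum)
def pvCheckE (power : List Int) (n : Nat) (r val : Int) (i : Nat) (expire : List Int) (added remaining : Int) : Bool :=
  if i < n then
    let added := added - expire.getD i 0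
    let cur := power.getD i 0 + added
    if cur < val then
      let need := val - cur
      if remaining < need then false
      else
        let e := (min (n : Int) ((i : Int) + 2 * r + 1)).toNat
        pvCheckE power n r val (i + 1) (expire.set e (expire.getD e 0 + need)) (added + need) (remaining - need)
    else pvCheckE power n r val (i + 1) expire added remaining
  else true
termination_by n - i

theorem pv_check_AE (cnt power : List Int) (n : Nat) (r val : Int) (hr : 0 ≤ r)
    (hcnt : cnt.length = n + 1)
    (hpow : ∀ i : Nat, i < n → power.getD i 0 = ((cnt.take (i+1)).sum)) :
    ∀ (N i : Nat) (diff exp : List Int) (added rem : Int), n - i ≤ N →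
    diff.length = n + 1 → exp.length = n + 1 →
    (∀ j : Nat, i ≤ j → diff.getD j 0 = cnt.getD j 0 - exp.getD j 0) →
    pvCheckA n r val i diff ((cnt.take i).sum + added) rem
      = pvCheckE power n r val i exp added rem
  | 0, i, diff, exp, added, rem, hN, _, _, _ => by
    rw [pvCheckA, pvCheckE]
    rw [if_neg (by omega), if_neg (by omega)]
  | N + 1, i, diff, exp, added, rem, hN, hdl, hel, hrel => by
    rw [pvCheckA, pvCheckE]
    by_cases hi : i < n
    · rw [if_pos hi, if_pos hi]
      have htot : (cnt.take i).sum + added + diff.getD i 0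
          = power.getD i 0 + (added - exp.getD i 0) := by
        rw [hpow i hi, hrel i (le_refl i), pv_sum_take_succ cnt i (by omega)]
        ring
      rw [htot]
      by_cases hlt : power.getD i 0 + (added - exp.getD i 0) < val
      · rw [if_pos hlt, if_pos hlt]
        by_cases hrem : rem < val - (power.getD i 0 + (added - exp.getD i 0))
        · rw [if_pos hrem, if_pos hrem]
        · rw [if_neg hrem, if_neg hrem]
          have he1 : i + 1 ≤ (min (n:Int) ((i:Int) + 2 * r + 1)).toNat := by omega
          have he2 : (min (n:Int) ((i:Int) + 2 * r + 1)).toNat ≤ n := by omega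
          have hstep : power.getD i 0 + (added - exp.getD i 0)
              + (val - (power.getD i 0 + (added - exp.getD i 0)))
              = (cnt.take (i+1)).sum + (added - exp.getD i 0
                + (val - (power.getD i 0 + (added - exp.getD i 0)))) := by
            rw [hpow i hi]; ring
          rw [hstep]
          apply pv_check_AE cnt power n r val hr hcnt hpow N (i+1) _ _ _ _ (by omega)
            (by rw [List.length_set]; exact hdl) (by rw [List.length_set]; exact hel)
          intro j hj
          by_cases hje : j = (min (n:Int) ((i:Int) + 2 * r + 1)).toNat
          · subst hje
            rw [pv_getD_set_self _ _ _ (by omega), pv_getD_set_self _ _ _ (by omega)]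
            rw [hrel _ (by omega)]
            ring
          · rw [pv_getD_set_ne _ _ _ _ (fun h => hje h.symm),
                pv_getD_set_ne _ _ _ _ (fun h => hje h.symm)]
            exact hrel j (by omega)
      · rw [if_neg hlt, if_neg hlt]
        have : power.getD i 0 + (added - exp.getD i 0)
            = (cnt.take (i+1)).sum + (added - exp.getD i 0) := by
          rw [hpow i hi]
        rw [this]
        exact pv_check_AE cnt power n r val hr hcnt hpow N (i+1) diff exp _ rem (by omega)
          hdl hel (fun j hj => hrel j (by omega))
    · rw [if_neg hi, if_neg hi]

-- sum of snd splits across a Boolean filter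
theorem pv_sum_filter_split (p : Nat × Int → Bool) :
    ∀ (l : List (Nat × Int)),
    ((l.filter p).map Prod.snd).sum + ((l.filter (fun x => !p x)).map Prod.snd).sum
      = (l.map Prod.snd).sum
  | [] => by simp
  | x :: l => by
    have ih := pv_sum_filter_split p l
    by_cases h : p x = true
    · simp [List.filter_cons, h]
      omega
    · have h' : p x = false := by simpa using h
      simp [List.filter_cons, h']
      omega

-- drain pops exactly the expired prefix (the queue is sorted by city index)
theorem pv_drain_spec (span : Int) (i : Nat) :
    ∀ (l : List (Nat × Int)) (live : Int), l.Pairwise (fun p q => p.1 < q.1) →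
    pvDrain span i l live
      = (l.filter (fun p => !decide ((p.1:Int) + span ≤ (i:Int))),
         live - ((l.filter (fun p => decide ((p.1:Int) + span ≤ (i:Int)))).map Prod.snd).sum)
  | [], live, _ => by simp [pvDrain]
  | (j, a) :: rest, live, hpair => by
    rw [pvDrain]
    by_cases hj : (j:Int) + span ≤ (i:Int)
    · rw [if_pos hj, pv_drain_spec span i rest (live - a) (List.Pairwise.sublist (List.sublist_cons_self _ _) hpair)]
      have hf1 : ((j, a) :: rest).filter (fun p => !decide ((p.1:Int) + span ≤ (i:Int)))
          = rest.filter (fun p => !decide ((p.1:Int) + span ≤ (i:Int))) := by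
        simp [List.filter_cons, hj]
      have hf2 : ((j, a) :: rest).filter (fun p => decide ((p.1:Int) + span ≤ (i:Int)))
          = (j, a) :: rest.filter (fun p => decide ((p.1:Int) + span ≤ (i:Int))) := by
        simp [List.filter_cons, hj]
      rw [hf1, hf2]
      simp only [List.map_cons, List.sum_cons, Prod.mk.injEq]
      exact ⟨trivial, by ring⟩
    · rw [if_neg hj]
      have hrest : ∀ p ∈ rest, ¬ ((p.1:Int) + span ≤ (i:Int)) := by
        intro p hp
        have := (List.pairwise_cons.mp hpair).1 p hp
        omega
      have h1 : ((j, a) :: rest).filter (fun p => !decide ((p.1:Int) + span ≤ (i:Int)))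
          = (j, a) :: rest := by
        apply List.filter_eq_self.mpr
        intro p hp
        rcases List.mem_cons.mp hp with h | h
        · subst h; simpa using hj
        · simpa using hrest p h
      have h2 : ((j, a) :: rest).filter (fun p => decide ((p.1:Int) + span ≤ (i:Int)))
          = [] := by
        apply List.filter_eq_nil_iff.mpr
        intro p hp
        rcases List.mem_cons.mp hp with h | h
        · subst h; simpa using hj
        · simpa using hrest p h
      rw [h1, h2]
      simp

-- E's expire-array scan equals B's FIFO-queue scan
theorem pv_check_EB (power : List Int) (n : Nat) (r val : Int) (hr : 0 ≤ r) :
    ∀ (N i : Nat) (exp : List Int) (pending : List (Nat × Int)) (added rem : Int),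
    n - i ≤ N → exp.length = n + 1 →
    (∀ p ∈ pending, (i:Int) ≤ (p.1:Int) + (2*r+1) ∧ p.1 < i) →
    pending.Pairwise (fun p q => p.1 < q.1) →
    added = (pending.map Prod.snd).sum →
    (∀ t : Nat, i ≤ t → exp.getD t 0
      = ((pending.filter (fun p => decide ((min (n:Int) ((p.1:Int)+(2*r+1))).toNat = t))).map Prod.snd).sum) →
    pvCheckE power n r val i exp added rem = pvCheckB power n (2*r+1) val i pending added rem
  | 0, i, exp, pending, added, rem, hN, _, _, _, _, _ => by
    rw [pvCheckE, pvCheckB]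
    rw [if_neg (by omega), if_neg (by omega)]
  | N + 1, i, exp, pending, added, rem, hN, hel, hmem, hpair, hsum, hexp => by
    rw [pvCheckE, pvCheckB]
    by_cases hi : i < n
    · rw [if_pos hi, if_pos hi]
      have hdrain := pv_drain_spec (2*r+1) i pending added hpair
      -- the popped amounts are exactly expire[i]
      have hkey : exp.getD i 0
          = ((pending.filter (fun p => decide ((p.1:Int) + (2*r+1) ≤ (i:Int)))).map Prod.snd).sum := by
        rw [hexp i (le_refl i)]
        congr 1
        congr 1
        apply List.filter_congr
        intro p hp
        have h1 := (hmem p hp).1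
        have h2 := min_le_right (n:Int) ((p.1:Int)+(2*r+1))
        have h3 := min_le_left (n:Int) ((p.1:Int)+(2*r+1))
        have h4 : (i:Int) < n → ((min (n:Int) ((p.1:Int)+(2*r+1))).toNat = i
            ↔ (p.1:Int) + (2*r+1) ≤ (i:Int)) := by
          intro hin
          constructor
          · intro h; omega
          · intro h
            have : min (n:Int) ((p.1:Int)+(2*r+1)) = (p.1:Int)+(2*r+1) := by omega
            omega
        simp only [decide_eq_decide]
        exact h4 (by omega)
      set S := ((pending.filter (fun p => decide ((p.1:Int) + (2*r+1) ≤ (i:Int)))).map Prod.snd).sum with hS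
      set Q := pending.filter (fun p => !decide ((p.1:Int) + (2*r+1) ≤ (i:Int))) with hQ
      have hQsum : (Q.map Prod.snd).sum = added - S := by
        rw [hQ, hS]
        have := pv_sum_filter_split (fun p => decide ((p.1:Int) + (2*r+1) ≤ (i:Int))) pending
        omega
      have hQmem : ∀ p ∈ Q, ((i:Int)+1 ≤ (p.1:Int) + (2*r+1) ∧ p.1 < i + 1) := by
        intro p hp
        have h1 := List.mem_filter.mp hp
        have h2 := (hmem p h1.1).2
        have h3 : ¬ ((p.1:Int) + (2*r+1) ≤ (i:Int)) := by
          have := h1.2; simpa using this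
        constructor
        · omega
        · omega
      have hQpair : Q.Pairwise (fun p q => p.1 < q.1) :=
        List.Pairwise.sublist List.filter_sublist hpair
      -- filtering by a future expiry index ignores the popped entries
      have hQfilter : ∀ t : Nat, i + 1 ≤ t →
          Q.filter (fun p => decide ((min (n:Int) ((p.1:Int)+(2*r+1))).toNat = t))
            = pending.filter (fun p => decide ((min (n:Int) ((p.1:Int)+(2*r+1))).toNat = t)) := by
        intro t ht
        rw [hQ, List.filter_filter]
        apply List.filter_congr
        intro p hp
        by_cases hpt : (min (n:Int) ((p.1:Int)+(2*r+1))).toNat = t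
        · have h2 := min_le_right (n:Int) ((p.1:Int)+(2*r+1))
          have h3 : ¬ ((p.1:Int) + (2*r+1) ≤ (i:Int)) := by omega
          simp [hpt, h3]
        · simp [hpt]
      rw [hdrain, hkey]
      by_cases hlt : power.getD i 0 + (added - S) < val
      · rw [if_pos hlt, if_pos (show 0 < val - power.getD i 0 - (added - S) by omega)]
        by_cases hrem : rem < val - (power.getD i 0 + (added - S))
        · rw [if_pos hrem, if_pos (show rem - (val - power.getD i 0 - (added - S)) < 0 by omega)]
        · rw [if_neg hrem, if_neg (show ¬ (rem - (val - power.getD i 0 - (added - S)) < 0) by omega)]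
          have harg1 : added - S + (val - (power.getD i 0 + (added - S)))
              = added - S + (val - power.getD i 0 - (added - S)) := by ring
          have harg2 : rem - (val - (power.getD i 0 + (added - S)))
              = rem - (val - power.getD i 0 - (added - S)) := by ring
          rw [harg1, harg2]
          set need := val - power.getD i 0 - (added - S) with hneed
          have he1 : (i:Int) + 1 ≤ min (n:Int) ((i:Int) + (2*r+1)) := by
            apply le_min <;> omega
          have he2 := min_le_left (n:Int) ((i:Int) + (2*r+1))
          set e := (min (n:Int) ((i:Int) + 2*r + 1)).toNat with he
          have hee : min (n:Int) ((i:Int) + (2*r+1)) = min (n:Int) ((i:Int) + 2*r + 1) := by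
            ring_nf
          have he3 : i + 1 ≤ e ∧ e ≤ n := by
            constructor <;> omega
          apply pv_check_EB power n r val hr N (i+1) _ _ _ _ (by omega)
            (by rw [List.length_set]; exact hel)
          · intro p hp
            rcases List.mem_append.mp hp with h | h
            · exact hQmem p h
            · have : p = (i, need) := by simpa using h
              subst this
              constructor
              · simp; omega
              · simp
          · rw [List.pairwise_append]
            refine ⟨hQpair, by simp, ?_⟩
            intro p hp q hq
            have h2 := (hmem p (List.mem_filter.mp hp).1).2
            have hq' : q = (i, need) := by simpa using hq
            subst hq'
            simpa using h2
          · simp [List.map_append, hQsum]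
          · intro t ht
            by_cases hte : t = e
            · subst hte
              rw [pv_getD_set_self _ _ _ (by omega)]
              rw [hexp e (by omega), List.filter_append, List.map_append, List.sum_append]
              have hP : (min (n:Int) ((i:Int)+(2*r+1))).toNat = e := by
                rw [hee]
              have hnew : ([(i, need)].filter
                  (fun p => decide ((min (n:Int) ((p.1:Int)+(2*r+1))).toNat = e))) = [(i, need)] := by
                simp [List.filter_cons, hP]
              rw [hnew, hQfilter e (by omega)]
              simp only [List.map_cons, List.map_nil, List.sum_cons, List.sum_nil]
              omega
            · rw [pv_getD_set_ne _ _ _ _ (fun h => hte h.symm)]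
              rw [hexp t (by omega), List.filter_append, List.map_append, List.sum_append]
              have hP : (min (n:Int) ((i:Int)+(2*r+1))).toNat ≠ t := by
                rw [hee, ← he]; exact fun h => hte h.symm
              have hnew : ([(i, need)].filter
                  (fun p => decide ((min (n:Int) ((p.1:Int)+(2*r+1))).toNat = t))) = [] := by
                simp [List.filter_cons, hP]
              rw [hnew, hQfilter t (by omega)]
              simp
      · rw [if_neg hlt, if_neg (show ¬ (0 < val - power.getD i 0 - (added - S)) by omega)]
        apply pv_check_EB power n r val hr N (i+1) exp Q (added - S) rem (by omega) hel
          hQmem hQpair hQsum.symm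
        intro t ht
        rw [hexp t (by omega), hQfilter t ht]
    · rw [if_neg hi, if_neg hi]

-- A's iterative res-accumulator search equals B's recursive Option search
theorem pv_search_eq (cnt power : List Int) (n : Nat) (r k : Int)
    (hck : ∀ val : Int, pvCheckA n r val 0 cnt 0 k = pvCheckB power n (2*r+1) val 0 [] 0 k) :
    ∀ (N : Nat) (lo hi res : Int), (hi + 1 - lo).toNat ≤ N →
    pvSearchA cnt n r k lo hi res = (pvSearchB power n (2*r+1) k lo hi).getD res
  | 0, lo, hi, res, hN => by
    rw [pvSearchA, pvSearchB]
    rw [if_neg (by omega : ¬ lo ≤ hi), if_pos (by omega : lo > hi)]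
    rfl
  | N + 1, lo, hi, res, hN => by
    rw [pvSearchA, pvSearchB]
    by_cases hlh : lo ≤ hi
    · rw [if_pos hlh, if_neg (by omega : ¬ lo > hi)]
      have hmid := PySem.Int.floordiv_two_mid_bounds hlh
      simp only
      rw [hck (PySem.Int.floordiv (lo + hi) 2)]
      by_cases hc : pvCheckB power n (2*r+1) (PySem.Int.floordiv (lo + hi) 2) 0 [] 0 k = true
      · rw [if_pos hc, if_pos hc]
        rw [pv_search_eq cnt power n r k hck N (PySem.Int.floordiv (lo + hi) 2 + 1) hi
            (PySem.Int.floordiv (lo + hi) 2) (by omega)]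
        cases hres : pvSearchB power n (2*r+1) k (PySem.Int.floordiv (lo + hi) 2 + 1) hi <;> simp
      · rw [if_neg hc, if_neg hc]
        exact pv_search_eq cnt power n r k hck N lo (PySem.Int.floordiv (lo + hi) 2 - 1) res (by omega)
    · rw [if_neg hlh, if_pos (by omega : lo > hi)]
      rfl

-- ===== VERDICT (by name: the statement is the Claim_ definition above) =====

theorem maxPower_spec : Claim_equal_maxPower := by
  intro stations r k _ hpre
  obtain ⟨hne, hr⟩ := hpre
  unfold Spec_maxPower maxPower maxPower_alt
  apply pv_search_eq _ _ _ _ _ _ ((stations.sum + k + 1 - (PySem.List.min? stations (fun x => x)).getD 0).toNat)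
    _ _ _ (le_refl _)
  intro val
  have h1 := pv_check_AE (pvBuildCnt stations r) (pvPowerB stations r) stations.length r val hr
    (pv_buildCnt_length stations r)
    (fun i hi => pv_power_getD stations r hr i hi)
    stations.length 0 (pvBuildCnt stations r) (List.replicate (stations.length + 1) 0) 0 k
    (by omega) (pv_buildCnt_length stations r) (by simp)
    (by
      intro j _
      rw [show (List.replicate (stations.length + 1) (0:Int)).getD j 0 = 0 from by
        simp [List.getD_eq_getElem?_getD, List.getElem?_replicate]; split <;> rfl]
      ring)
  have h2 := pv_check_EB (pvPowerB stations r) stations.length r val hr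
    stations.length 0 (List.replicate (stations.length + 1) 0) [] 0 k
    (by omega) (by simp) (by simp) (by simp) (by simp)
    (by
      intro t _
      rw [show (List.replicate (stations.length + 1) (0:Int)).getD t 0 = 0 from by
        simp [List.getD_eq_getElem?_getD, List.getElem?_replicate]; split <;> rfl]
      simp)
  simpa using h1.trans h2
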